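-- pv_equiv track=rewrite | github.com/zhlien/Code-for-the-test | Question_7/Question_7.2/Q7.2_coordinates_to_index.py | C_2_I
-- ===== SOURCE A (Python) =====
-- def C_2_I(coords, Ls):
--     coef = [1]
--     cur_coef = 1
--     for i in range(0,len(Ls)-1):
--         cur_coef = Ls[i]*cur_coef
--         coef.append(cur_coef)
--
--     Is = []
--     for i in range(0,len(coords)):
--         cur_I = 0
--         for j in range(0, len(coords[i])):
--             cur_I += coords[i][j] * coef[j]
--         Is.append(cur_I)
--     return Is
-- ===== SOURCE B (Python) =====
-- def C_2_I(coords, Ls):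
--     res = []
--     for coord in coords:
--         acc, c = 0, 1
--         it = iter(Ls)
--         for x in coord:
--             acc += x * c
--             c *= next(it, 1)
--         res.append(acc)
--     return res
-- ===== Notes on version B (the rewrite author's own statement) =====
-- stated objective: simpler
-- what changed: B replaces A's two-phase structure (precompute the mixed-radix coefficient table, then an index-based dot product per coordinate) by a single interleaved pass per coordinate that maintains a running coefficient via an iterator over Ls, with no table and no index arithmetic.
import Mathlib
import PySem

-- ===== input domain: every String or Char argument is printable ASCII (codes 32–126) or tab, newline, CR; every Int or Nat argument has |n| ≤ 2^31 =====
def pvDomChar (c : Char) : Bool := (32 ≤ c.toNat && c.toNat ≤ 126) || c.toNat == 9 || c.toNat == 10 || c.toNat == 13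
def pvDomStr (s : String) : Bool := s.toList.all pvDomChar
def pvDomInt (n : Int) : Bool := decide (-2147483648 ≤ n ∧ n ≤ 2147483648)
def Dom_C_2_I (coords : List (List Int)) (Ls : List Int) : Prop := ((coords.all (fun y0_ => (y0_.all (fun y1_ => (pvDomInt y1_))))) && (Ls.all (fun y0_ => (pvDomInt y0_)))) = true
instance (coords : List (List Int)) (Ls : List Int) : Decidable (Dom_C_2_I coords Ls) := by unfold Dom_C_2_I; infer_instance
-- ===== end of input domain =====

-- B converts coordinates to linear indices in one interleaved pass with a running coefficient
-- (no precomputed coefficient table); same values as A wherever A returns, objective: simpler.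

-- ===== PORT A =====
-- 'coef[j]' where j ≥ len(coef) is Python's IndexError; such inputs are excluded by Pre_C_2_I,
-- so the pyGetD default 0 is never consulted on admitted inputs.
def C_2_I (coords : List (List Int)) (Ls : List Int) : List Int :=
  let coefSt := (PySem.List.pyRange 0 ((Ls.length : Int) - 1) 1).foldl
    (fun (st : List Int × Int) i =>
      let cur_coef := PySem.List.pyGetD Ls i 0 * st.2
      (st.1 ++ [cur_coef], cur_coef)) ([1], 1)
  let coef := coefSt.1
  (PySem.List.pyRange 0 (coords.length : Int) 1).foldl
    (fun Is i =>
      let coord := PySem.List.pyGetD coords i []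
      let cur_I := (PySem.List.pyRange 0 (coord.length : Int) 1).foldl
        (fun acc j => acc + PySem.List.pyGetD coord j 0 * PySem.List.pyGetD coef j 0) 0
      Is ++ [cur_I]) []

-- ===== PORT B =====
-- state = (acc, c, remaining elements of the iterator over Ls); 'c *= next(it, 1)'
def altStep (st : Int × Int × List Int) (x : Int) : Int × Int × List Int :=
  match st with
  | (acc, c, l :: rest) => (acc + x * c, c * l, rest)
  | (acc, c, []) => (acc + x * c, c * 1, [])

def C_2_I_alt (coords : List (List Int)) (Ls : List Int) : List Int :=
  coords.map (fun coord => (coord.foldl altStep (0, 1, Ls)).1)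

-- ===== PRECONDITION & SPEC =====
-- Pre_ excludes exactly the inputs on which A raises IndexError: some coordinate tuple longer
-- than A's coefficient table (whose length is max 1 (len Ls)).
def Pre_C_2_I (coords : List (List Int)) (Ls : List Int) : Prop :=
  ∀ c ∈ coords, c.length ≤ max 1 Ls.length
instance (coords : List (List Int)) (Ls : List Int) : Decidable (Pre_C_2_I coords Ls) := by
  unfold Pre_C_2_I; infer_instance
def pvWitness_C_2_I : List (List Int) × List Int := ([[1, 0], [0, 2], [1, 1]], [2, 3])

def Spec_C_2_I (coords : List (List Int)) (Ls : List Int) (out : List Int) : Prop := out = C_2_I_alt coords Ls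
instance (coords : List (List Int)) (Ls : List Int) (out : List Int) : Decidable (Spec_C_2_I coords Ls out) := by unfold Spec_C_2_I; infer_instance

-- ===== CLAIM (what is proved, stated in full; the proofs are below) =====
def Claim_equal_C_2_I : Prop := ∀ (coords : List (List Int)) (Ls : List Int), Dom_C_2_I coords Ls → Pre_C_2_I coords Ls → Spec_C_2_I coords Ls (C_2_I coords Ls)
-- ===== LEMMAS AND PROOFS =====

-- reference value: mixed-radix dot product with running coefficient c (B's per-coordinate semantics)
def mrDot : List Int → List Int → Int → Int
  | [], _, _ => 0
  | x :: xs, [], c => x * c + mrDot xs [] c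
  | x :: xs, l :: ls, c => x * c + mrDot xs ls (c * l)

theorem altStep_fst (coord : List Int) : ∀ (ls : List Int) (acc c : Int),
    (coord.foldl altStep (acc, c, ls)).1 = acc + mrDot coord ls c := by
  induction coord with
  | nil => intro ls acc c; simp [mrDot]
  | cons x xs ih =>
    intro ls acc c
    cases ls with
    | nil => simp [List.foldl_cons, altStep, mrDot, ih, add_assoc]
    | cons l rest => simp [List.foldl_cons, altStep, mrDot, ih, add_assoc]

theorem mrDot_sum (coord : List Int) : ∀ (ls : List Int) (c : Int),
    mrDot coord ls c
      = ((List.range coord.length).map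
          (fun k => coord.getD k 0 * (c * (ls.take k).prod))).sum := by
  induction coord with
  | nil => intro ls c; simp [mrDot]
  | cons x xs ih =>
    intro ls c
    cases ls with
    | nil =>
      simp [mrDot, List.range_succ_eq_map, ih, List.map_map, Function.comp_def]
    | cons l rest =>
      simp [mrDot, List.range_succ_eq_map, ih, List.map_map, Function.comp_def, mul_assoc]

-- A's coefficient table is the prefix products of Ls, one entry per j < max 1 (len Ls)
theorem coef_aux (Ls : List Int) : ∀ (n : Nat), n ≤ Ls.length →
    (PySem.List.pyRange 0 (n : Int) 1).foldl
      (fun (st : List Int × Int) i =>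
        let cur_coef := PySem.List.pyGetD Ls i 0 * st.2
        (st.1 ++ [cur_coef], cur_coef)) ([1], 1)
      = ((List.range (n + 1)).map (fun j => (Ls.take j).prod), (Ls.take n).prod) := by
  intro n
  induction n with
  | zero => intro _; simp
  | succ m ih =>
    intro h
    have hm : m ≤ Ls.length := Nat.le_of_succ_le h
    have hrange : PySem.List.pyRange 0 ((m : Int) + 1) 1
        = PySem.List.pyRange 0 (m : Int) 1 ++ [(m : Int)] :=
      PySem.List.pyRange_one_succ_right (by positivity)
    have hcast : ((m + 1 : Nat) : Int) = (m : Int) + 1 := by push_cast; ring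
    rw [hcast, hrange, List.foldl_append, ih hm]
    have hget : PySem.List.pyGetD Ls (m : Int) 0 = Ls.getD m 0 :=
      PySem.List.pyGetD_natCast Ls m 0
    have hlt : m < Ls.length := h
    have htake : (Ls.take (m + 1)).prod = (Ls.take m).prod * Ls[m] := List.prod_take_succ Ls m hlt
    have hrangeS : List.range (m + 1 + 1) = List.range (m + 1) ++ [m + 1] := List.range_succ
    simp only [List.foldl_cons, List.foldl_nil, hget]
    rw [hrangeS]
    simp [htake, List.getD_eq_getElem?_getD, List.getElem?_eq_getElem hlt, mul_comm]

theorem coef_eq (Ls : List Int) :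
    ((PySem.List.pyRange 0 ((Ls.length : Int) - 1) 1).foldl
      (fun (st : List Int × Int) i =>
        let cur_coef := PySem.List.pyGetD Ls i 0 * st.2
        (st.1 ++ [cur_coef], cur_coef)) ([1], 1)).1
      = (List.range (max 1 Ls.length)).map (fun j => (Ls.take j).prod) := by
  cases Ls with
  | nil => simp [PySem.List.pyRange_one_eq_nil (by norm_num : (-1 : Int) ≤ 0)]
  | cons a as =>
    have hlen : ((a :: as).length : Int) - 1 = ((as.length : Nat) : Int) := by
      simp
    rw [hlen, coef_aux (a :: as) as.length (by simp)]
    have : max 1 (a :: as).length = as.length + 1 := by simp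
    rw [this]

-- per-coordinate agreement under the length bound
theorem inner_eq (Ls coord : List Int) (h : coord.length ≤ max 1 Ls.length) :
    (PySem.List.pyRange 0 (coord.length : Int) 1).foldl
      (fun acc j => acc + PySem.List.pyGetD coord j 0 *
        PySem.List.pyGetD ((List.range (max 1 Ls.length)).map (fun j => (Ls.take j).prod)) j 0) 0
      = (coord.foldl altStep (0, 1, Ls)).1 := by
  rw [altStep_fst coord Ls 0 1, mrDot_sum coord Ls 1]
  rw [PySem.List.pyRange_one]
  simp only [sub_zero, Int.toNat_natCast, List.foldl_map, zero_add]
  rw [PySem.List.foldl_add]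
  simp only [zero_add]
  congr 1
  apply List.map_congr_left
  intro k hk
  have hk' : k < coord.length := List.mem_range.mp hk
  have hkm : k < max 1 Ls.length := lt_of_lt_of_le hk' h
  rw [PySem.List.pyGetD_natCast coord k 0,
      PySem.List.pyGetD_natCast ((List.range (max 1 Ls.length)).map (fun j => (Ls.take j).prod)) k 0]
  rw [List.getD_eq_getElem?_getD (l := (List.range (max 1 Ls.length)).map fun j => (Ls.take j).prod),
      List.getElem?_map, List.getElem?_range hkm]
  simp

-- ===== VERDICT (by name: the statement is the Claim_ definition above) =====
theorem C_2_I_spec : Claim_equal_C_2_I := by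
  intro coords Ls _ hpre
  unfold Spec_C_2_I C_2_I C_2_I_alt
  dsimp only
  rw [coef_eq Ls]
  rw [PySem.List.foldl_pyRange_zero_pyGetD' coords []
        (fun Is coord =>
          Is ++ [(PySem.List.pyRange 0 (coord.length : Int) 1).foldl
            (fun acc j => acc + PySem.List.pyGetD coord j 0 *
              PySem.List.pyGetD ((List.range (max 1 Ls.length)).map (fun j => (Ls.take j).prod)) j 0) 0]) []]
  rw [PySem.List.foldl_append_singleton_eq_map, List.nil_append]
  apply List.map_congr_left
  intro coord hc
  exact inner_eq Ls coord (hpre coord hc)
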